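-- pv_equiv track=rewrite | github.com/akazako1/CollinsLab_ScrunchingAnalysis | peak_analysis.py | match_peaks_valleys
-- ===== SOURCE A (Python) =====
-- def match_peaks_valleys(peak, list_of_valleys):
--     if peak<list_of_valleys[0]:     # check if there is no left valley:
--         return 0, list_of_valleys[0]
--     if peak>list_of_valleys[-1]:      # check if there is no right valley:
--         return list_of_valleys[-1], peak+10
--     for i in range(len(list_of_valleys)):
--         if list_of_valleys[i]<peak and list_of_valleys[i+1]>peak:
--             left_valley = list_of_valleys[i]
--             right_valley = list_of_valleys[i+1]
--             return left_valley, right_valley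
-- ===== SOURCE B (Python) =====
-- def match_peaks_valleys(peak, list_of_valleys):
--     if peak < list_of_valleys[0]:
--         return 0, list_of_valleys[0]
--     if peak > list_of_valleys[-1]:
--         return list_of_valleys[-1], peak + 10
--     # binary search: lo ends at the first index whose valley is >= peak
--     lo, hi = 0, len(list_of_valleys)
--     while lo < hi:
--         mid = (lo + hi) // 2
--         if list_of_valleys[mid] < peak:
--             lo = mid + 1
--         else:
--             hi = mid
--     if list_of_valleys[lo] == peak:
--         return None
--     return list_of_valleys[lo - 1], list_of_valleys[lo]
-- ===== Notes on version B (the rewrite author's own statement) =====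
-- stated objective: alternative
-- what changed: A linearly scans adjacent pairs for the first strictly-bracketing pair; B binary-searches (hand-written bisect_left loop) for the first valley >= peak and reads the bracketing pair off that position (O(log n) lookups instead of a scan, though a timing run could not measure this inside Pre_); Pre_ excludes the empty list (A raises IndexError) and unsorted valley lists whose peak lies between the first and last valley, where A's first-adjacent-pair answer is an accident of scan order (valley lists from peak detection are sorted by construction).
-- outside the precondition, e.g. on match_peaks_valleys(3, [1, 5, 2, 6]): A returns (1, 5), B returns (2, 6)
import Mathlib
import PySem

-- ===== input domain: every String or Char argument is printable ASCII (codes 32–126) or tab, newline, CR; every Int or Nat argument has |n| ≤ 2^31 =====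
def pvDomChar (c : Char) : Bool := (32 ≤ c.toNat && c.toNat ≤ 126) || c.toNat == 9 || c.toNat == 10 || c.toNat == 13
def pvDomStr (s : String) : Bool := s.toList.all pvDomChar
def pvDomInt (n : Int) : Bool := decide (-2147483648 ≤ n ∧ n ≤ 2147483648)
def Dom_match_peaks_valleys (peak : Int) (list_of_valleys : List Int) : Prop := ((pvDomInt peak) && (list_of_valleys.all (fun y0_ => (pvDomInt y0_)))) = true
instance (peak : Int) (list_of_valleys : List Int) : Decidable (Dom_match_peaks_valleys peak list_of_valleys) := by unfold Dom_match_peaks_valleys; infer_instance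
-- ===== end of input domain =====

-- B replaces A's linear scan for the first strictly-bracketing adjacent pair by a
-- binary search for the first valley >= peak (Pre_: nonempty, sorted valley list).


-- ===== PORT A =====
-- A's for-loop with early return; 'none' in the index lookups is Python's IndexError.
def matchLoopA (peak : Int) (lv : List Int) : List Int → Option (Int × Int)
  | [] => none
  | i :: rest =>
    match PySem.List.pyGet? lv i with
    | none => none
    | some vi =>
      if vi < peak then
        match PySem.List.pyGet? lv (i + 1) with
        | none => none
        | some vi1 =>
          if vi1 > peak then some (vi, vi1) else matchLoopA peak lv rest
      else matchLoopA peak lv rest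

def match_peaks_valleys (peak : Int) (list_of_valleys : List Int) : Option (Int × Int) :=
  match PySem.List.pyGet? list_of_valleys 0 with
  | none => none  -- IndexError on the empty list; excluded by Pre_
  | some v0 =>
    if peak < v0 then some (0, v0)
    else
      match PySem.List.pyGet? list_of_valleys (-1) with
      | none => none
      | some vl =>
        if peak > vl then some (vl, peak + 10)
        else matchLoopA peak list_of_valleys (PySem.List.pyRange 0 list_of_valleys.length 1)

-- ===== PORT B =====
-- Source B's while-loop: binary search for the first index with lv[idx] >= peak.
-- (getD is exact here: Source B only reaches lv[mid] with mid < len(lv).)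
def bisectLoop (peak : Int) (lv : List Int) (lo hi : Nat) : Nat :=
  if _h : lo < hi then
    let mid := (lo + hi) / 2
    if lv.getD mid 0 < peak then bisectLoop peak lv (mid + 1) hi
    else bisectLoop peak lv lo mid
  else lo
termination_by hi - lo
decreasing_by all_goals omega

def match_peaks_valleys_alt (peak : Int) (list_of_valleys : List Int) : Option (Int × Int) :=
  match PySem.List.pyGet? list_of_valleys 0 with
  | none => none  -- IndexError on the empty list; excluded by Pre_
  | some v0 =>
    if peak < v0 then some (0, v0)
    else
      match PySem.List.pyGet? list_of_valleys (-1) with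
      | none => none
      | some vl =>
        if peak > vl then some (vl, peak + 10)
        else
          let lo := bisectLoop peak list_of_valleys 0 list_of_valleys.length
          match PySem.List.pyGet? list_of_valleys (lo : Int) with
          | none => none  -- IndexError; unreachable inside Pre_
          | some x =>
            if x = peak then none
            else
              match PySem.List.pyGet? list_of_valleys ((lo : Int) - 1) with
              | none => none
              | some y => some (y, x)

-- ===== PRECONDITION & SPEC =====
-- Pre_ excludes the empty list (A raises IndexError) and unsorted valley lists
-- whose peak lies between the first and last valley: valley lists from peak
-- detection are sorted by construction, and on such unsorted input A's
-- first-adjacent-pair answer is an accident of scan order that no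
-- implementation of this task would specify (when the peak falls outside the
-- first..last range both programs take the same early return, so those inputs
-- stay inside Pre_ even unsorted).
def Pre_match_peaks_valleys (peak : Int) (list_of_valleys : List Int) : Prop :=
  list_of_valleys ≠ [] ∧ (List.Pairwise (· ≤ ·) list_of_valleys ∨
    peak < list_of_valleys.headI ∨ list_of_valleys.getLastD 0 < peak)
instance (peak : Int) (list_of_valleys : List Int) : Decidable (Pre_match_peaks_valleys peak list_of_valleys) := by unfold Pre_match_peaks_valleys; infer_instance

def pvWitness_match_peaks_valleys : Int × List Int := (5, [1, 3, 8, 9])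

def Spec_match_peaks_valleys (peak : Int) (list_of_valleys : List Int) (out : Option (Int × Int)) : Prop := out = match_peaks_valleys_alt peak list_of_valleys
instance (peak : Int) (list_of_valleys : List Int) (out : Option (Int × Int)) : Decidable (Spec_match_peaks_valleys peak list_of_valleys out) := by unfold Spec_match_peaks_valleys; infer_instance

-- ===== CLAIM (what is proved, stated in full; the proofs are below) =====
def Claim_equal_match_peaks_valleys : Prop := ∀ (peak : Int) (list_of_valleys : List Int), Dom_match_peaks_valleys peak list_of_valleys → Pre_match_peaks_valleys peak list_of_valleys → Spec_match_peaks_valleys peak list_of_valleys (match_peaks_valleys peak list_of_valleys)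

-- ===== LEMMAS AND PROOFS =====

theorem pyGet?_some_of_lt (lv : List Int) (j : Int) (h0 : 0 ≤ j) (hlt : j.toNat < lv.length) :
    PySem.List.pyGet? lv j = some lv[j.toNat] := by
  rw [PySem.List.pyGet?_of_nonneg _ h0]
  simp [List.getElem?_eq_getElem hlt]

theorem sorted_mono (lv : List Int) (hs : List.Pairwise (· ≤ ·) lv) {i j : Nat}
    (hi : i < lv.length) (hj : j < lv.length) (hij : i ≤ j) : lv[i] ≤ lv[j] := by
  rcases Nat.lt_or_ge i j with h | h
  · exact List.pairwise_iff_getElem.mp hs i j hi hj h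
  · have : i = j := by omega
    subst this; exact le_refl _

theorem getIdx_eq (lv : List Int) {i j : Nat} (hij : i = j) (hj : j < lv.length) :
    lv[i]'(hij ▸ hj) = lv[j] := by subst hij; rfl

theorem bisectLoop_spec (peak : Int) (lv : List Int) (hs : List.Pairwise (· ≤ ·) lv) :
    ∀ lo hi : Nat, lo ≤ hi → hi ≤ lv.length →
    (∀ j (hj : j < lv.length), j < lo → lv[j] < peak) →
    (∀ j (hj : j < lv.length), hi ≤ j → peak ≤ lv[j]) →
    bisectLoop peak lv lo hi ≤ lv.length ∧
    (∀ j (hj : j < lv.length), j < bisectLoop peak lv lo hi → lv[j] < peak) ∧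
    (∀ j (hj : j < lv.length), bisectLoop peak lv lo hi ≤ j → peak ≤ lv[j]) := by
  intro lo hi
  induction lo, hi using bisectLoop.induct (peak := peak) (lv := lv) with
  | case1 lo hi hlt mid hcond ih =>
    intro _ hhi H1 H2
    have hmlt : (lo + hi) / 2 < lv.length := by omega
    have hcond' : lv.getD ((lo + hi) / 2) 0 < peak := hcond
    rw [bisectLoop, dif_pos hlt, if_pos hcond]
    refine ih (by omega) hhi ?_ H2
    intro j hj hjlo
    rcases Nat.lt_or_ge j lo with h | h
    · exact H1 j hj h
    · have hjm : j ≤ (lo + hi) / 2 := by omega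
      have := sorted_mono lv hs hj hmlt hjm
      have hmv : lv.getD ((lo + hi) / 2) 0 = lv[(lo + hi) / 2] := List.getD_eq_getElem lv 0 hmlt
      rw [hmv] at hcond'
      omega
  | case2 lo hi hlt mid hcond ih =>
    intro hlo hhi H1 H2
    have hmlt : (lo + hi) / 2 < lv.length := by omega
    have hcond' : ¬ lv.getD ((lo + hi) / 2) 0 < peak := hcond
    rw [bisectLoop, dif_pos hlt, if_neg hcond]
    refine ih (by omega) (by omega) H1 ?_
    intro j hj hjm
    have := sorted_mono lv hs hmlt hj hjm
    have hmv : lv.getD ((lo + hi) / 2) 0 = lv[(lo + hi) / 2] := List.getD_eq_getElem lv 0 hmlt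
    rw [hmv] at hcond'
    omega
  | case3 lo hi hlt =>
    intro hlo hhi H1 H2
    rw [bisectLoop, dif_neg hlt]
    exact ⟨by omega, fun j hj h => H1 j hj h, fun j hj h => H2 j hj (by omega)⟩

-- First strictly-bracketing adjacent pair among a list of candidate indices.
def firstIdx (peak : Int) (lv : List Int) : List Int → Option (Int × Int)
  | [] => none
  | j :: t =>
    match PySem.List.pyGet? lv j, PySem.List.pyGet? lv (j + 1) with
    | some l, some r => if l < peak ∧ peak < r then some (l, r) else firstIdx peak lv t
    | _, _ => firstIdx peak lv t

theorem firstIdx_append (peak : Int) (lv : List Int) (l1 l2 : List Int) :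
    firstIdx peak lv (l1 ++ l2) = (firstIdx peak lv l1).or (firstIdx peak lv l2) := by
  induction l1 with
  | nil => simp [firstIdx]
  | cons j t ih =>
    simp only [List.cons_append, firstIdx]
    rcases h1 : PySem.List.pyGet? lv j with _ | l
    · exact ih
    · rcases h2 : PySem.List.pyGet? lv (j + 1) with _ | r
      · exact ih
      · by_cases hc : l < peak ∧ peak < r
        · simp [hc]
        · simp [hc, ih]

theorem firstIdx_none (peak : Int) (lv : List Int) (js : List Int)
    (H : ∀ j ∈ js, ∀ l r, PySem.List.pyGet? lv j = some l → PySem.List.pyGet? lv (j + 1) = some r →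
        ¬ (l < peak ∧ peak < r)) : firstIdx peak lv js = none := by
  induction js with
  | nil => rfl
  | cons j t ih =>
    have ht : firstIdx peak lv t = none := ih (fun x hx => H x (by simp [hx]))
    simp only [firstIdx]
    rcases h1 : PySem.List.pyGet? lv j with _ | l
    · exact ht
    · rcases h2 : PySem.List.pyGet? lv (j + 1) with _ | r
      · exact ht
      · simp [H j (by simp) l r h1 h2, ht]

theorem matchLoopA_eq_firstIdx (peak : Int) (lv : List Int) (js : List Int)
    (H : ∀ j ∈ js, (PySem.List.pyGet? lv j).isSome ∧
        (∀ v, PySem.List.pyGet? lv j = some v → v < peak → (PySem.List.pyGet? lv (j + 1)).isSome)) :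
    matchLoopA peak lv js = firstIdx peak lv js := by
  induction js with
  | nil => rfl
  | cons j t ih =>
    obtain ⟨h1, h2⟩ := H j (by simp)
    have ht : ∀ j ∈ t, (PySem.List.pyGet? lv j).isSome ∧
        (∀ v, PySem.List.pyGet? lv j = some v → v < peak → (PySem.List.pyGet? lv (j + 1)).isSome) :=
      fun x hx => H x (by simp [hx])
    simp only [matchLoopA, firstIdx]
    rcases hg : PySem.List.pyGet? lv j with _ | vi
    · simp [hg] at h1
    · by_cases hvi : vi < peak
      · rcases hg2 : PySem.List.pyGet? lv (j + 1) with _ | vi1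
        · have := h2 vi hg hvi
          simp [hg2] at this
        · simp only [hvi, if_true]
          by_cases hr : vi1 > peak
          · simp [hr, gt_iff_lt]
          · have : ¬ (vi < peak ∧ peak < vi1) := by
              intro ⟨_, h⟩; exact hr h
            simp [hr, ih ht]
      · simp only [hvi, if_false]
        rcases hg2 : PySem.List.pyGet? lv (j + 1) with _ | vi1
        · exact ih ht
        · have hc : ¬ (vi < peak ∧ peak < vi1) := fun h => hvi h.1
          simp [hc, ih ht]

-- ===== VERDICT (by name: the statement is the Claim_ definition above) =====
theorem match_peaks_valleys_spec : Claim_equal_match_peaks_valleys := by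
  intro peak lv _ ⟨hne, hpre⟩
  unfold Spec_match_peaks_valleys match_peaks_valleys match_peaks_valleys_alt
  rcases h0 : PySem.List.pyGet? lv 0 with _ | v0
  · rfl
  · by_cases hp0 : peak < v0
    · simp [hp0]
    · simp only [hp0, if_false]
      rcases hl : PySem.List.pyGet? lv (-1) with _ | vl
      · rfl
      · by_cases hpl : peak > vl
        · simp [hpl]
        · simp only [hpl, if_false]
          -- inside the main branch the peak lies in the first..last range, so
          -- Pre_'s disjunction leaves only the sorted case
          have hsorted : List.Pairwise (· ≤ ·) lv := by
            rcases hpre with h | h | h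
            · exact h
            · exfalso
              have hh : lv.headI = v0 := by
                rw [PySem.List.pyGet?_zero] at h0
                cases lv with
                | nil => exact absurd rfl hne
                | cons a t => simpa using h0
              rw [hh] at h
              exact hp0 h
            · exfalso
              have hh : lv.getLastD 0 = vl := by
                rw [PySem.List.pyGet?_neg_one] at hl
                rw [List.getLastD_eq_getLast?, hl]
                rfl
              rw [hh] at h
              exact hpl h
          have hn : 1 ≤ lv.length := by
            cases lv with
            | nil => exact absurd rfl hne
            | cons a t => simp
          -- values at the two ends
          have hv0 : v0 = lv[0]'(by omega) := by
            rw [pyGet?_some_of_lt lv 0 (by omega) (by simpa using hn)] at h0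
            injection h0 with h; exact h.symm
          have hvl : vl = lv[lv.length - 1]'(by omega) := by
            rw [PySem.List.pyGet?_neg_one, List.getLast?_eq_getElem?] at hl
            rw [List.getElem?_eq_getElem (by omega)] at hl
            injection hl with h; exact h.symm
          -- bisect facts
          obtain ⟨hkle, hkj, hjk⟩ := bisectLoop_spec peak lv hsorted 0 lv.length (by omega)
            (le_refl _) (by omega) (by omega)
          set k := bisectLoop peak lv 0 lv.length with hkdef
          have hklt : k < lv.length := by
            by_contra h
            have : k = lv.length := by omega
            have := hkj (lv.length - 1) (by omega) (by omega)
            omega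
          have hpk : peak ≤ lv[k] := hjk k hklt (le_refl _)
          -- A's loop equals firstIdx over the index range
          have hA : matchLoopA peak lv (PySem.List.pyRange 0 lv.length 1) =
              firstIdx peak lv (PySem.List.pyRange 0 lv.length 1) := by
            apply matchLoopA_eq_firstIdx
            intro j hj
            rw [PySem.List.mem_pyRange_one] at hj
            obtain ⟨hj0, hjn⟩ := hj
            constructor
            · rw [pyGet?_some_of_lt lv j hj0 (by omega)]; simp
            · intro v hv hvp
              by_cases hje : j = (lv.length : Int) - 1
              · subst hje
                rw [pyGet?_some_of_lt lv _ hj0 (by omega)] at hv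
                injection hv with hv
                have h1 : lv[((lv.length : Int) - 1).toNat]'(by omega) = lv[lv.length - 1]'(by omega) :=
                  getIdx_eq lv (by omega) (by omega)
                exfalso
                omega
              · rw [pyGet?_some_of_lt lv (j + 1) (by omega) (by omega)]; simp
          rw [hA]
          -- B's value and A's firstIdx, by cases on whether lv[k] = peak
          rw [pyGet?_some_of_lt lv (k : Int) (by omega) (by simpa using hklt)]
          simp only [Int.toNat_natCast]
          by_cases heq : lv[k] = peak
          · -- no strictly-bracketing pair exists: both sides are none
            simp only [heq, if_true]
            apply firstIdx_none
            intro j hjmem l r h1 h2 ⟨hlp, hpr⟩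
            rw [PySem.List.mem_pyRange_one] at hjmem
            obtain ⟨hj0, hjn⟩ := hjmem
            rw [pyGet?_some_of_lt lv j hj0 (by omega)] at h1
            injection h1 with h1
            have hjk' : j.toNat < k := by
              by_contra h
              have := hjk j.toNat (by omega) (by omega)
              omega
            have hj1n : (j + 1).toNat ≤ lv.length := by omega
            rcases Nat.lt_or_ge (j + 1).toNat lv.length with hlt2 | hge2
            · rw [pyGet?_some_of_lt lv (j + 1) (by omega) hlt2] at h2
              injection h2 with h2
              have hle : (j + 1).toNat ≤ k := by omega
              have := sorted_mono lv hsorted hlt2 hklt hle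
              omega
            · -- j = len - 1 impossible: lv[j] = lv[-1] ≥ peak
              have h3 : lv[j.toNat]'(by omega) = lv[lv.length - 1]'(by omega) :=
                getIdx_eq lv (by omega) (by omega)
              omega
          · -- lv[k] > peak strictly; k ≥ 1 and (k-1, k) is the unique bracketing pair
            simp only [if_neg heq]
            have hpklt : peak < lv[k] := lt_of_le_of_ne hpk (fun h => heq h.symm)
            have hk1 : 1 ≤ k := by
              by_contra h
              have h3 : lv[k]'(hklt) = lv[0]'(by omega) := getIdx_eq lv (by omega) (by omega)
              omega
            have hkm1 : lv[k - 1]'(by omega) < peak := hkj (k - 1) (by omega) (by omega)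
            rw [pyGet?_some_of_lt lv ((k : Int) - 1) (by omega) (by omega)]
            have htn : ((k : Int) - 1).toNat = k - 1 := by omega
            simp only [htn]
            -- split the range at k-1
            rw [PySem.List.pyRange_one_append 0 ((k : Int) - 1) lv.length (by omega) (by omega),
              firstIdx_append]
            have hfail : firstIdx peak lv (PySem.List.pyRange 0 ((k : Int) - 1) 1) = none := by
              apply firstIdx_none
              intro j hjmem l r h1 h2 ⟨hlp, hpr⟩
              rw [PySem.List.mem_pyRange_one] at hjmem
              obtain ⟨hj0, hjn⟩ := hjmem
              rw [pyGet?_some_of_lt lv (j + 1) (by omega) (by omega)] at h2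
              injection h2 with h2
              have : (j + 1).toNat ≤ k - 1 := by omega
              have := sorted_mono lv hsorted (i := (j+1).toNat) (j := k - 1) (by omega) (by omega) this
              omega
            rw [hfail, Option.none_or,
              PySem.List.pyRange_one_cons (by omega : ((k : Int) - 1) < lv.length)]
            simp only [firstIdx]
            rw [pyGet?_some_of_lt lv ((k : Int) - 1) (by omega) (by omega)]
            have h11 : (k : Int) - 1 + 1 = (k : Int) := by omega
            rw [h11, pyGet?_some_of_lt lv (k : Int) (by omega) (by simpa using hklt)]
            simp only [htn, Int.toNat_natCast]
            simp [hkm1, hpklt]
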